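-- pv_equiv track=rewrite | github.com/tbracht/pyaceqd | pyaceqd/tools.py | basis_states
-- ===== SOURCE A (Python) =====
-- import itertools
--
-- def generate_basis_states(dim):
--         basis_states = []
--         indices_range = [range(d) for d in dim]
--         # from itertools.product documentation:
--         # Cartesian product of input iterables.
--         # The nested loops cycle like an odometer with the rightmost element advancing on every iteration.
--         for indices in itertools.product(*indices_range):
--             basis_states.append(indices)
--         return basis_states
--
-- def basis_states(dim):
--     # generates readable basis state representation, for use in plotting etc.
--     # if dim is no list, make it one
--     if not isinstance(dim, list):
--         dim = [dim]
--     basis_states = generate_basis_states(dim)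
--     _basis_states = []
--     for basis_state in basis_states:
--         basis_state_str = '|'
--         for index in basis_state:
--             basis_state_str += f'{index},'
--         basis_state_str = basis_state_str.rstrip(',')
--         basis_state_str += '⟩'
--         _basis_states.append(basis_state_str)
--     return _basis_states
-- ===== SOURCE B (Python) =====
-- def basis_states(dim):
--     # mixed-radix decoding: enumerate j in range(prod(dim)) and decode its digits,
--     # instead of enumerating the Cartesian product of index tuples
--     if not isinstance(dim, list):
--         dim = [dim]
--     if any(d <= 0 for d in dim):
--         return []
--     total = 1
--     for d in dim:
--         total *= d
--     out = []
--     for j in range(total):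
--         digits = []
--         r = j
--         for d in reversed(dim):
--             digits.append(str(r % d))
--             r //= d
--         out.append('|' + ','.join(reversed(digits)) + '\u27e9')
--     return out
-- ===== Notes on version B (the rewrite author's own statement) =====
-- stated objective: alternative
-- what changed: Replaces itertools.product enumeration of index tuples by mixed-radix decoding: it counts j from 0 to prod(dim) and decodes j's digits with repeated divmod, short-circuiting to an empty result when some dimension is nonpositive, and builds each label with a comma join instead of append-then-rstrip.
import Mathlib
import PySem

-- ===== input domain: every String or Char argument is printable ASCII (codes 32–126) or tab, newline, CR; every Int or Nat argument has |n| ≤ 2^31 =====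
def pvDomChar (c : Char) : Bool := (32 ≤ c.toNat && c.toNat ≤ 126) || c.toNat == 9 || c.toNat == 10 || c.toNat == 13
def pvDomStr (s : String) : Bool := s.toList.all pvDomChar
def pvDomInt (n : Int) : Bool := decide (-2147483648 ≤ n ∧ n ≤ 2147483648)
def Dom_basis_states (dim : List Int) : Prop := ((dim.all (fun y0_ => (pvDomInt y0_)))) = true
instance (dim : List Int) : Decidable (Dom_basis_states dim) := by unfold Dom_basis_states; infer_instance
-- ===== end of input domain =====

-- B replaces itertools.product enumeration of index tuples by mixed-radix decoding of a
-- running counter j ∈ range(prod dim), and joins the digits instead of append-then-rstrip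
-- (objective: alternative algorithm, same cost).

-- ===== PORT A =====
-- itertools.product(*rs), ported by hand as its documented recursive semantics
-- (exact: the rightmost iterable advances fastest)
def pyProduct : List (List Int) → List (List Int)
  | [] => [[]]
  | r :: rs => r.flatMap (fun x => (pyProduct rs).map (fun t => x :: t))

def generate_basis_states (dim : List Int) : List (List Int) :=
  pyProduct (dim.map (fun d => PySem.List.pyRange 0 d 1))

-- s.rstrip(','), ported by hand (exact for the one-character strip set {','})
def rstripComma (cs : List Char) : List Char :=
  (cs.reverse.dropWhile (fun c => c == ',')).reverse

def basis_states (dim : List Int) : List String :=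
  (generate_basis_states dim).map (fun basis_state =>
    String.mk
      (rstripComma (basis_state.foldl
          (fun s index => s ++ (PySem.Int.toChars index ++ [','])) ['|'])
        ++ ['⟩']))

-- ===== PORT B =====
def basis_states_alt (dim : List Int) : List String :=
  if dim.any (fun d => decide (d ≤ 0)) then []
  else
    (PySem.List.pyRange 0 (dim.foldl (fun acc d => acc * d) 1) 1).map (fun j =>
      let st := dim.reverse.foldl
        (fun (st : List (List Char) × Int) d =>
          (st.1 ++ [PySem.Int.toChars (PySem.Int.mod st.2 d)], PySem.Int.floordiv st.2 d))
        ([], j)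
      String.mk ('|' :: PySem.Chars.join [','] st.1.reverse ++ ['⟩']))

-- ===== PRECONDITION & SPEC =====
def Spec_basis_states (dim : List Int) (out : List String) : Prop := out = basis_states_alt dim
instance (dim : List Int) (out : List String) : Decidable (Spec_basis_states dim out) := by unfold Spec_basis_states; infer_instance

-- ===== CLAIM (what is proved, stated in full; the proofs are below) =====
def Claim_equal_basis_states : Prop := ∀ (dim : List Int), Dom_basis_states dim → Spec_basis_states dim (basis_states dim)

-- ===== LEMMAS AND PROOFS =====

-- mixed-radix digits of j, least significant first, for the reversed dimension list
def decodeRev : List Int → Int → List Int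
  | [], _ => []
  | d :: ds, j => PySem.Int.mod j d :: decodeRev ds (PySem.Int.floordiv j d)

theorem digitChar_ne_comma (m : Nat) : Nat.digitChar m ≠ ',' := by
  rcases Nat.lt_or_ge m 16 with h | h
  · interval_cases m <;> decide
  · have e : Nat.digitChar m = '*' := by
      unfold Nat.digitChar
      rw [if_neg (by omega), if_neg (by omega), if_neg (by omega), if_neg (by omega),
        if_neg (by omega), if_neg (by omega), if_neg (by omega), if_neg (by omega),
        if_neg (by omega), if_neg (by omega), if_neg (by omega), if_neg (by omega),
        if_neg (by omega), if_neg (by omega), if_neg (by omega), if_neg (by omega)]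
    rw [e]; decide

theorem toDigitsCore_ne_nil (f : Nat) : ∀ (n : Nat) (ds : List Char),
    Nat.toDigitsCore 10 (f + 1) n ds ≠ [] := by
  induction f with
  | zero =>
    intro n ds
    unfold Nat.toDigitsCore
    dsimp only
    split <;> simp [Nat.toDigitsCore]
  | succ k ih =>
    intro n ds
    unfold Nat.toDigitsCore
    dsimp only
    split
    · simp
    · exact ih _ _

theorem comma_not_mem_toDigitsCore (f : Nat) : ∀ (n : Nat) (ds : List Char),
    ',' ∉ ds → ',' ∉ Nat.toDigitsCore 10 f n ds := by
  induction f with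
  | zero => intro n ds h; simpa [Nat.toDigitsCore] using h
  | succ k ih =>
    intro n ds h
    unfold Nat.toDigitsCore
    dsimp only
    split
    · simp only [List.mem_cons, not_or]
      exact ⟨fun hx => digitChar_ne_comma _ hx.symm, h⟩
    · refine ih _ _ ?_
      simp only [List.mem_cons, not_or]
      exact ⟨fun hx => digitChar_ne_comma _ hx.symm, h⟩

theorem toChars_ne_nil (n : Int) : PySem.Int.toChars n ≠ [] := by
  unfold PySem.Int.toChars Nat.toDigits
  split
  · simp
  · exact toDigitsCore_ne_nil _ _ _

theorem comma_not_mem_toChars (n : Int) : ',' ∉ PySem.Int.toChars n := by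
  unfold PySem.Int.toChars
  split
  · simp only [List.mem_cons, not_or]
    exact ⟨by decide, comma_not_mem_toDigitsCore _ _ _ (by simp)⟩
  · exact comma_not_mem_toDigitsCore _ _ _ (by simp)

theorem rstripComma_concat (xs d : List Char) (hne : d ≠ []) (hd : ',' ∉ d) :
    rstripComma (xs ++ (d ++ [','])) = xs ++ d := by
  unfold rstripComma
  have hrev : d.reverse ≠ [] := by simpa using hne
  obtain ⟨h, t, e⟩ := List.exists_cons_of_ne_nil hrev
  have hmem : h ∈ d := List.mem_reverse.mp (by rw [e]; exact List.mem_cons_self)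
  have hd' : (h == ',') = false := by
    simp only [beq_eq_false_iff_ne]
    intro h'; exact hd (h' ▸ hmem)
  simp [List.reverse_append, e, hd']
  simpa using congrArg List.reverse e.symm

theorem foldA_eq (t : List Int) : ∀ (pre : List Char),
    t.foldl (fun s i => s ++ (PySem.Int.toChars i ++ [','])) pre
      = pre ++ (t.map (fun i => PySem.Int.toChars i ++ [','])).flatten := by
  induction t with
  | nil => intro pre; simp
  | cons a t ih => intro pre; simp [List.foldl_cons, ih]

theorem join_concat (ls : List (List Char)) (x : List Char) :
    PySem.Chars.join [','] (ls ++ [x]) = (ls.map (fun c => c ++ [','])).flatten ++ x := by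
  induction ls with
  | nil => simp [PySem.Chars.join_singleton]
  | cons a ls ih =>
    obtain ⟨c, rest, e⟩ : ∃ c rest, ls ++ [x] = c :: rest := by
      cases ls <;> exact ⟨_, _, rfl⟩
    rw [List.cons_append, e, PySem.Chars.join_cons_cons, ← e, ih]
    simp [List.append_assoc]

theorem fmt_eq (t : List Int) :
    rstripComma (t.foldl (fun s i => s ++ (PySem.Int.toChars i ++ [','])) ['|']) ++ ['⟩']
      = '|' :: PySem.Chars.join [','] (t.map PySem.Int.toChars) ++ ['⟩'] := by
  rcases List.eq_nil_or_concat t with rfl | ⟨ts, i, rfl⟩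
  · simp [rstripComma, PySem.Chars.join, List.intercalate]
  · simp only [List.concat_eq_append]
    rw [foldA_eq]
    have h1 : ['|'] ++ ((ts ++ [i]).map (fun j => PySem.Int.toChars j ++ [','])).flatten
        = ('|' :: (ts.map (fun j => PySem.Int.toChars j ++ [','])).flatten)
          ++ (PySem.Int.toChars i ++ [',']) := by
      simp
    rw [h1, rstripComma_concat _ _ (toChars_ne_nil i) (comma_not_mem_toChars i)]
    rw [show (ts ++ [i]).map PySem.Int.toChars
        = ts.map PySem.Int.toChars ++ [PySem.Int.toChars i] by simp]
    rw [join_concat]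
    simp [List.map_map, Function.comp_def]

theorem pyProduct_nil_of_nonpos (dims : List Int) (d : Int) (hmem : d ∈ dims) (hd : d ≤ 0) :
    pyProduct (dims.map (fun d => PySem.List.pyRange 0 d 1)) = [] := by
  induction dims with
  | nil => cases hmem
  | cons r rs ih =>
    rcases List.mem_cons.mp hmem with rfl | hmem'
    · simp [pyProduct, PySem.List.pyRange_one_eq_nil hd]
    · simp [pyProduct, ih hmem']

theorem pyProduct_concat (rs : List (List Int)) (r : List Int) :
    pyProduct (rs ++ [r]) = (pyProduct rs).flatMap (fun t => r.map (fun x => t ++ [x])) := by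
  induction rs with
  | nil =>
    show List.flatMap (fun x => [[x]]) r = _
    induction r with
    | nil => simp
    | cons a r ihr => simp_all [pyProduct]
  | cons a rs ih =>
    simp only [List.cons_append, pyProduct, ih]
    simp [List.flatMap_map, List.map_flatMap, List.flatMap_assoc, List.map_map, Function.comp_def]

theorem foldl_mul_pos (ds : List Int) : ∀ (acc : Int), 0 < acc → (∀ d ∈ ds, 0 < d) →
    0 < ds.foldl (fun acc d => acc * d) acc := by
  induction ds with
  | nil => intro acc h _; simpa using h
  | cons a ds ih =>
    intro acc h hall
    exact ih _ (mul_pos h (hall a List.mem_cons_self))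
      (fun d hd => hall d (List.mem_cons_of_mem _ hd))

theorem range_mul_nat (m n : Nat) :
    List.range (m * n) = (List.range m).flatMap (fun q => (List.range n).map (fun r => q * n + r)) := by
  induction m with
  | zero => simp
  | succ m ih =>
    rw [Nat.succ_mul, List.range_add, ih, List.range_succ]
    simp

theorem range_mul (P d : Int) (hP : 0 ≤ P) (hd : 0 < d) :
    PySem.List.pyRange 0 (P * d) 1
      = (PySem.List.pyRange 0 P 1).flatMap
          (fun q => (PySem.List.pyRange 0 d 1).map (fun r => q * d + r)) := by
  obtain ⟨p, rfl⟩ := Int.eq_ofNat_of_zero_le hP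
  obtain ⟨k, rfl⟩ := Int.eq_ofNat_of_zero_le hd.le
  rw [PySem.List.pyRange_one 0 ((p : Int) * k), PySem.List.pyRange_one 0 (p : Int),
    PySem.List.pyRange_one 0 (k : Int)]
  have h1 : (((p : Int) * k - 0)).toNat = p * k := by
    omega
  have h2 : (((p : Int)) - 0).toNat = p := by omega
  have h3 : (((k : Int)) - 0).toNat = k := by omega
  rw [h1, h2, h3, range_mul_nat]
  simp [List.map_flatMap, List.flatMap_map, List.map_map, Function.comp_def]

theorem decode_concat (ds : List Int) (d q r : Int) (hd : 0 < d)
    (hr0 : 0 ≤ r) (hrd : r < d) :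
    (decodeRev ((ds ++ [d]).reverse) (q * d + r)).reverse
      = (decodeRev ds.reverse q).reverse ++ [r] := by
  have hmod : PySem.Int.mod (q * d + r) d = r := by
    rw [PySem.Int.mod_eq_emod_of_pos hd]
    rw [show q * d + r = r + d * q by ring, Int.add_mul_emod_self_left]
    exact Int.emod_eq_of_lt hr0 hrd
  have hdiv : PySem.Int.floordiv (q * d + r) d = q := by
    rw [PySem.Int.floordiv_eq_ediv_of_pos hd]
    rw [show q * d + r = r + q * d by ring, Int.add_mul_ediv_right _ _ (by omega : d ≠ 0)]
    rw [Int.ediv_eq_zero_of_lt hr0 hrd]; ring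
  simp [List.reverse_append, decodeRev, hmod, hdiv]

theorem product_eq_decode (dims : List Int) (hall : ∀ d ∈ dims, 0 < d) :
    pyProduct (dims.map (fun d => PySem.List.pyRange 0 d 1))
      = (PySem.List.pyRange 0 (dims.foldl (fun acc d => acc * d) 1) 1).map
          (fun j => (decodeRev dims.reverse j).reverse) := by
  induction dims using List.reverseRecOn with
  | nil =>
    have : PySem.List.pyRange 0 1 1 = [0] := by decide
    simp [pyProduct, this, decodeRev]
  | append_singleton ds d ih =>
    have hd : 0 < d := hall d (by simp)
    have hds : ∀ x ∈ ds, 0 < x := fun x hx => hall x (by simp [hx])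
    have hP : 0 < ds.foldl (fun acc d => acc * d) 1 := foldl_mul_pos ds 1 one_pos hds
    rw [List.map_append, List.map_singleton, pyProduct_concat, ih hds]
    rw [List.foldl_append, List.foldl_cons, List.foldl_nil]
    rw [range_mul _ _ hP.le hd]
    rw [List.flatMap_map, List.map_flatMap]
    refine List.flatMap_congr (fun q hq => ?_)
    rw [List.map_map]
    refine List.map_congr_left (fun r hr => ?_)
    have hr' := PySem.List.mem_pyRange_one.mp hr
    exact (decode_concat ds d q r hd hr'.1 hr'.2).symm

theorem foldB_fst (ds : List Int) : ∀ (acc : List (List Char)) (j : Int),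
    (ds.foldl
        (fun (st : List (List Char) × Int) d =>
          (st.1 ++ [PySem.Int.toChars (PySem.Int.mod st.2 d)], PySem.Int.floordiv st.2 d))
        (acc, j)).1
      = acc ++ (decodeRev ds j).map PySem.Int.toChars := by
  induction ds with
  | nil => intro acc j; simp [decodeRev]
  | cons d ds ih =>
    intro acc j
    simp only [List.foldl_cons, ih, decodeRev, List.map_cons]
    simp

-- ===== VERDICT (by name: the statement is the Claim_ definition above) =====
theorem basis_states_spec : Claim_equal_basis_states := by
  intro dim _
  unfold Spec_basis_states basis_states basis_states_alt generate_basis_states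
  by_cases hneg : dim.any (fun d => decide (d ≤ 0))
  · obtain ⟨d, hmem, hd⟩ := List.any_eq_true.mp hneg
    rw [if_pos hneg, pyProduct_nil_of_nonpos dim d hmem (by simpa using hd)]
    simp
  · rw [if_neg hneg]
    have hall : ∀ d ∈ dim, 0 < d := by
      intro d hd
      by_contra h
      exact hneg (List.any_eq_true.mpr ⟨d, hd, by simpa using by omega⟩)
    rw [product_eq_decode dim hall, List.map_map]
    refine List.map_congr_left (fun j _ => ?_)
    simp only [Function.comp_apply, foldB_fst, List.nil_append]
    rw [show ((decodeRev dim.reverse j).map PySem.Int.toChars).reverse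
        = ((decodeRev dim.reverse j).reverse).map PySem.Int.toChars by
      rw [List.map_reverse]]
    exact congrArg String.mk (fmt_eq _)
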